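-- pv_equiv track=rewrite | github.com/infiniator/ImplementCBD | src/converter.py | sequenceToMatrix
-- ===== SOURCE A (Python) =====
-- def sequenceToMatrix(sequence):
--     components = {}
--     for i in range(len(sequence)):
--         if sequence[i] in components:
--             components[sequence[i]].append(i + 1)
--         else:
--             components[sequence[i]] = [i + 1]
--     return list(components.values())
-- ===== SOURCE B (Python) =====
-- def sequenceToMatrix(sequence):
--     keys = list(dict.fromkeys(sequence))
--     return [[i + 1 for i, v in enumerate(sequence) if v == k] for k in keys]
-- ===== Notes on version B (the rewrite author's own statement) =====
-- stated objective: alternative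
-- what changed: Replaces A's single pass that accumulates index lists into a dict with an ordered distinct-key extraction (dict.fromkeys) followed by one full scan of the sequence per distinct key collecting its 1-based positions.
import Mathlib
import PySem

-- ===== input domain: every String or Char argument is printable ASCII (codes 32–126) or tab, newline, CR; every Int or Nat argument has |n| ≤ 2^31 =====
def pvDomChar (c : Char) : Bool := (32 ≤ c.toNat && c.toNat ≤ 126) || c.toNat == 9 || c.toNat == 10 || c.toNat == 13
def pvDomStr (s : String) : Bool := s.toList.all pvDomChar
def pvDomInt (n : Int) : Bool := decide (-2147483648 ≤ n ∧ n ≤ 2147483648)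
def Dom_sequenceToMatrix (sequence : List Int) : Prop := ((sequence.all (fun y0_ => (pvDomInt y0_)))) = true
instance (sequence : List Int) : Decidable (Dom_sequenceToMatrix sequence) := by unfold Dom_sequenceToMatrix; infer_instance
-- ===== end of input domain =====

-- B groups 1-based indices by value via ordered distinct-key extraction plus one scan per key,
-- instead of A's single-pass dict accumulation; same return value, alternative decomposition.

-- ===== PORT A =====
def sequenceToMatrix (sequence : List Int) : List (List Int) :=
  ((PySem.List.pyRange 0 (sequence.length : Int) 1).foldl
    (fun (d : PySem.Dict Int (List Int)) i =>
      if d.contains (PySem.List.pyGetD sequence i 0) then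
        d.modify (PySem.List.pyGetD sequence i 0) [] (fun l => l ++ [i + 1])
      else
        d.insert (PySem.List.pyGetD sequence i 0) [i + 1])
    PySem.Dict.empty).values

-- ===== PORT B =====
def sequenceToMatrix_alt (sequence : List Int) : List (List Int) :=
  (PySem.List.dedup sequence).map (fun k =>
    (PySem.List.enumerate sequence 0).filterMap
      (fun iv => if iv.2 == k then some (iv.1 + 1) else none))

-- ===== PRECONDITION & SPEC =====
def Spec_sequenceToMatrix (sequence : List Int) (out : List (List Int)) : Prop := out = sequenceToMatrix_alt sequence
instance (sequence : List Int) (out : List (List Int)) : Decidable (Spec_sequenceToMatrix sequence out) := by unfold Spec_sequenceToMatrix; infer_instance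

-- ===== CLAIM (what is proved, stated in full; the proofs are below) =====
def Claim_equal_sequenceToMatrix : Prop := ∀ (sequence : List Int), Dom_sequenceToMatrix sequence → Spec_sequenceToMatrix sequence (sequenceToMatrix sequence)

-- ===== LEMMAS AND PROOFS =====

-- A's conditional step is exactly an unconditional `modify` step.
theorem stepA_eq_modify (xs : List Int) (d : PySem.Dict Int (List Int)) (i : Int) :
    (if d.contains (PySem.List.pyGetD xs i 0) then
        d.modify (PySem.List.pyGetD xs i 0) [] (fun l => l ++ [i + 1])
      else
        d.insert (PySem.List.pyGetD xs i 0) [i + 1])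
    = d.modify (PySem.List.pyGetD xs i 0) [] (fun l => l ++ [i + 1]) := by
  by_cases h : d.contains (PySem.List.pyGetD xs i 0)
  · simp [h]
  · simp only [Bool.not_eq_true] at h
    simp [h, PySem.Dict.modify, PySem.Dict.getD_of_not_contains _ _ h]

-- the index loop's pair list (value, 1-based position) is the enumerate pair list, swapped
theorem pairlist_eq (xs : List Int) :
    (PySem.List.pyRange 0 (xs.length : Int) 1).map
        (fun i => (PySem.List.pyGetD xs i 0, i + 1))
    = (PySem.List.enumerate xs 0).map (fun iv => (iv.2, iv.1 + 1)) := by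
  apply List.ext_getElem
  · simp [PySem.List.length_pyRange_one, PySem.List.length_enumerate]
  · intro j h1 h2
    simp only [List.getElem_map]
    have hj : j < xs.length := by
      simpa [PySem.List.length_pyRange_one] using h1
    have he : j < (PySem.List.enumerate xs 0).length := by
      simpa [PySem.List.length_enumerate] using hj
    have hfst : (PySem.List.enumerate xs 0)[j].1 = (j : Int) := by
      have h := congrArg (fun l => l[j]?) (PySem.List.map_fst_enumerate xs 0)
      simp only [List.getElem?_map, PySem.List.getElem?_pyRange_one] at h
      rw [List.getElem?_eq_getElem he] at h
      simp only [Option.map_some] at h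
      have hcond : j < ((0 + (xs.length : Int)) - 0).toNat := by omega
      rw [if_pos hcond] at h
      simpa using (Option.some.inj h)
    have hsnd : (PySem.List.enumerate xs 0)[j].2 = xs[j] := by
      have h := congrArg (fun l => l[j]?) (PySem.List.map_snd_enumerate xs 0)
      simp only [List.getElem?_map] at h
      rw [List.getElem?_eq_getElem he, List.getElem?_eq_getElem hj] at h
      simpa using h
    have h1' : j < (PySem.List.pyRange 0 (xs.length : Int) 1).length := by
      simpa using h1
    have hrange : (PySem.List.pyRange 0 (xs.length : Int) 1)[j]'h1' = (j : Int) := by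
      simp [PySem.List.getElem_pyRange_one 0 (xs.length : Int) j h1']
    rw [hrange, hfst, hsnd]
    simp [PySem.List.pyGetD_natCast, List.getD_eq_getElem?_getD, hj]

-- comprehension-with-guard as filter-then-map
theorem filterMap_guard (e : List (Int × Int)) (k : Int) :
    e.filterMap (fun iv => if iv.2 == k then some (iv.1 + 1) else none)
    = ((e.map (fun iv => (iv.2, iv.1 + 1))).filter (fun p => p.1 == k)).map (fun p => p.2) := by
  induction e with
  | nil => rfl
  | cons a t ih =>
    simp only [List.map_cons, List.filter_cons, List.filterMap_cons, beq_iff_eq] at ih ⊢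
    by_cases h : a.2 = k <;> simp [h, ih]

-- ===== VERDICT (by name: the statement is the Claim_ definition above) =====
theorem sequenceToMatrix_spec : Claim_equal_sequenceToMatrix := by
  intro xs _
  show sequenceToMatrix xs = sequenceToMatrix_alt xs
  unfold sequenceToMatrix sequenceToMatrix_alt
  -- replace A's conditional step by the unconditional modify step
  have hstep :
      (PySem.List.pyRange 0 (xs.length : Int) 1).foldl
        (fun (d : PySem.Dict Int (List Int)) i =>
          if d.contains (PySem.List.pyGetD xs i 0) then
            d.modify (PySem.List.pyGetD xs i 0) [] (fun l => l ++ [i + 1])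
          else
            d.insert (PySem.List.pyGetD xs i 0) [i + 1])
        PySem.Dict.empty
      = ((PySem.List.pyRange 0 (xs.length : Int) 1).map
            (fun i => (PySem.List.pyGetD xs i 0, i + 1))).foldl
          (fun (d : PySem.Dict Int (List Int)) p => d.modify p.1 [] (fun l => l ++ [p.2]))
          PySem.Dict.empty := by
    rw [List.foldl_map]
    exact PySem.List.foldl_congr_mem _ _ _ _ (fun d i _ => stepA_eq_modify xs d i)
  rw [hstep, pairlist_eq]
  set e := PySem.List.enumerate xs 0 with he
  set l := e.map (fun iv => (iv.2, iv.1 + 1)) with hl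
  set D := l.foldl (fun (d : PySem.Dict Int (List Int)) p => d.modify p.1 [] (fun l => l ++ [p.2]))
      PySem.Dict.empty with hD
  have hkeysnd : D.keys.Nodup := by
    rw [hD]
    exact PySem.Dict.nodup_keys_foldl_modify_key l (fun p => p.1) []
      (fun d p v => v ++ [p.2]) PySem.Dict.empty (by simp)
  have hkeys : D.keys = PySem.Set.ofList xs := by
    rw [hD, PySem.Dict.keys_foldl_modify_key l (fun p => p.1) [] (fun d p v => v ++ [p.2])]
    rw [PySem.Dict.keys_empty, PySem.Set.update_nil_left]
    congr 1
    rw [hl, List.map_map]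
    exact PySem.List.map_snd_enumerate xs 0
  have hvals : D.values = D.keys.map (fun k => D.getD k []) :=
    PySem.Dict.values_eq_map_keys D hkeysnd []
  rw [hvals, hkeys, PySem.List.dedup_eq_ofList]
  apply List.map_congr_left
  intro k _
  rw [hD, PySem.Dict.getD_foldl_modify_append, PySem.Dict.getD_empty]
  rw [filterMap_guard e k]
  simp [hl]
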